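-- pv_equiv track=rewrite | github.com/ishandotsh/resnet-search-engine | app.py | get_best_indices
-- ===== SOURCE A (Python) =====
-- def get_best_indices(distances, n=10):
--     dist_sorted = sorted(distances)
--     image_idxs = []
--     for d in dist_sorted[:n]:
--         ind = distances.index(d)
--         if ind not in image_idxs:
--             image_idxs.append(ind)
--     return image_idxs
-- ===== SOURCE B (Python) =====
-- def get_best_indices(distances, n=10):
--     first = {}
--     cnt = {}
--     for i, d in enumerate(distances):
--         first.setdefault(d, i)
--         cnt[d] = cnt.get(d, 0) + 1
--     out = []
--     seen = 0
--     for v in sorted(first):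
--         if seen >= n:
--             break
--         out.append(first[v])
--         seen += cnt[v]
--     return out
-- ===== Notes on version B (the rewrite author's own statement) =====
-- stated objective: faster
-- what changed: A sorts, then for each of the n smallest sorted values rescans the whole list with distances.index and dedupes against the output; B makes one pass building a value-to-first-index dict and a counter, then walks the sorted distinct values once, emitting each first index until the cumulative count reaches n.
-- intended difference: For negative n where the list is longer than |n|, A's slice dist_sorted[:n] accidentally keeps all but the last |n| sorted values so A returns a nonempty index list, while B returns an empty list — the intended answer when asked for a non-positive number of best matches. — e.g. on get_best_indices([5, 3], -1): A returns [1], B returns []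
import Mathlib
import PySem

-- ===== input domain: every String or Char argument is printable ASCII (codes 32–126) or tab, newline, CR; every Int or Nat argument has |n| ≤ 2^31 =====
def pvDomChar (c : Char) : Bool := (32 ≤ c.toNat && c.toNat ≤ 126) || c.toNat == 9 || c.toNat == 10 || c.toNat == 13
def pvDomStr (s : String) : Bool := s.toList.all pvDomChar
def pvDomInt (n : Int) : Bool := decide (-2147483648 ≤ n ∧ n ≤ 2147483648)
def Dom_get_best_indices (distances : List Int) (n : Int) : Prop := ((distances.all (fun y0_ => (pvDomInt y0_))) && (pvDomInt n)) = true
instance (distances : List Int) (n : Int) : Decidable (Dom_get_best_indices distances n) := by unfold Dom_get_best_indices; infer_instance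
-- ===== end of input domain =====

-- B replaces A's per-element `distances.index(d)` scans over the sorted prefix by a single pass
-- building a first-index dict and a counter, then one walk over the sorted distinct values with a
-- cumulative count (objective: faster — drops the O(n·m) inner scans).

-- ===== PORT A =====
def get_best_indices (distances : List Int) (n : Int) : List Int :=
  let dist_sorted := PySem.List.sorted distances (fun x => x) false
  (PySem.List.slice dist_sorted none (some n)).foldl
    (fun image_idxs d =>
      -- distances.index(d): d is drawn from sorted(distances), so it is always present;
      -- the .getD 0 branch is unreachable (ValueError cannot happen here)
      let ind : Int := ((PySem.List.index? distances d).getD 0 : Nat)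
      if ind ∈ image_idxs then image_idxs else image_idxs ++ [ind]) []

-- ===== PORT B =====
-- the `for v in sorted(first): if seen >= n: break; …` loop of Source B
def bestLoop (first cnt : PySem.Dict Int Int) (k : Int) :
    List Int → List Int → Int → List Int
  | [], out, _ => out
  | v :: vs, out, seen =>
    if seen ≥ k then out
    else bestLoop first cnt k vs (out ++ [first.getD v 0]) (seen + cnt.getD v 0)

def get_best_indices_alt (distances : List Int) (n : Int) : List Int :=
  let fc := (PySem.List.enumerate distances 0).foldl
    (fun (p : PySem.Dict Int Int × PySem.Dict Int Int) id =>
      (p.1.setdefault id.2 id.1, p.2.insert id.2 (p.2.getD id.2 0 + 1)))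
    (PySem.Dict.empty, PySem.Dict.empty)
  bestLoop fc.1 fc.2 n (PySem.List.sorted fc.1.keys (fun x => x) false) [] 0

-- ===== PRECONDITION & SPEC =====
-- For negative n where the list is longer than |n|, A's slice dist_sorted[:n] accidentally keeps all but
-- the last |n| sorted values so A returns a nonempty index list, while B returns an empty list — the intended
-- answer when asked for a non-positive number of best matches.
def D_get_best_indices (distances : List Int) (n : Int) : Prop :=
  n < 0 ∧ 1 ≤ (distances.length : Int) + n
instance (distances : List Int) (n : Int) : Decidable (D_get_best_indices distances n) := by unfold D_get_best_indices; infer_instance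

def Spec_get_best_indices (distances : List Int) (n : Int) (out : List Int) : Prop := ¬ D_get_best_indices distances n → out = get_best_indices_alt distances n
instance (distances : List Int) (n : Int) (out : List Int) : Decidable (Spec_get_best_indices distances n out) := by unfold Spec_get_best_indices; infer_instance

def pvDiffWitness_get_best_indices : List Int × Int := ([5, 3], -1)
def pvDiffWitnessOut_get_best_indices : (List Int) × (List Int) := ([1], [])

-- ===== CLAIM (what is proved, stated in full; the proofs are below) =====
def Claim_unchanged_get_best_indices : Prop := ∀ (distances : List Int) (n : Int), Dom_get_best_indices distances n → Spec_get_best_indices distances n (get_best_indices distances n)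
def Claim_changed_get_best_indices : Prop := Dom_get_best_indices (pvDiffWitness_get_best_indices.1) (pvDiffWitness_get_best_indices.2) ∧ D_get_best_indices (pvDiffWitness_get_best_indices.1) (pvDiffWitness_get_best_indices.2) ∧ get_best_indices (pvDiffWitness_get_best_indices.1) (pvDiffWitness_get_best_indices.2) = pvDiffWitnessOut_get_best_indices.1 ∧ get_best_indices_alt (pvDiffWitness_get_best_indices.1) (pvDiffWitness_get_best_indices.2) = pvDiffWitnessOut_get_best_indices.2 ∧ pvDiffWitnessOut_get_best_indices.1 ≠ pvDiffWitnessOut_get_best_indices.2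
def Claim_exact_get_best_indices : Prop := ∀ (distances : List Int) (n : Int), Dom_get_best_indices distances n → D_get_best_indices distances n → get_best_indices distances n ≠ get_best_indices_alt distances n

-- ===== LEMMAS AND PROOFS =====

-- the (Int-valued) index of the first occurrence of d in xs
def firstIdx (xs : List Int) (d : Int) : Int := ((PySem.List.index? xs d).getD 0 : Nat)

-- the distinct values of xs in increasing order
def vsOf (xs : List Int) : List Int := PySem.List.sorted (PySem.List.dedup xs) (fun x => x) false

-- the sorted list, written as value blocks
def blocksOf (xs : List Int) : List Int := (vsOf xs).flatMap (fun v => List.replicate (xs.count v) v)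

lemma firstIdx_inj {xs : List Int} {a b : Int} (ha : a ∈ xs) (hb : b ∈ xs)
    (h : firstIdx xs a = firstIdx xs b) : a = b := by
  obtain ⟨ja, hja⟩ := Option.isSome_iff_exists.mp ((PySem.List.index?_isSome_iff xs a).mpr ha)
  obtain ⟨jb, hjb⟩ := Option.isSome_iff_exists.mp ((PySem.List.index?_isSome_iff xs b).mpr hb)
  obtain ⟨hlta, hgeta, -⟩ := PySem.List.getElem_of_index?_eq_some hja
  obtain ⟨hltb, hgetb, -⟩ := PySem.List.getElem_of_index?_eq_some hjb
  unfold firstIdx at h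
  rw [hja, hjb] at h
  simp only [Option.getD_some, Int.natCast_inj] at h
  subst h
  rw [← hgeta, ← hgetb]

lemma foldl_add_cons {u : List Int} {v : Int} (hv : v ∉ u) :
    ∀ s : List Int, List.foldl PySem.Set.add (v :: s) u = v :: List.foldl PySem.Set.add s u := by
  induction u with
  | nil => intro s; rfl
  | cons y u ih =>
    intro s
    have hyv : y ≠ v := fun e => hv (e ▸ List.mem_cons_self)
    have hvu : v ∉ u := fun e => hv (List.mem_cons_of_mem _ e)
    have hstep : PySem.Set.add (v :: s) y = v :: PySem.Set.add s y := by
      by_cases hys : y ∈ s <;> simp [PySem.Set.add, hys, hyv]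
    rw [List.foldl_cons, List.foldl_cons, hstep, ih hvu]

lemma ofList_eq_foldl (l : List Int) :
    PySem.Set.ofList l = List.foldl PySem.Set.add [] l := rfl

lemma ofList_append (l t : List Int) :
    PySem.Set.ofList (l ++ t) = List.foldl PySem.Set.add (PySem.Set.ofList l) t := by
  simp [ofList_eq_foldl]

lemma dedup_cons_not_mem {v : Int} {u : List Int} (hv : v ∉ u) :
    PySem.List.dedup (v :: u) = v :: PySem.List.dedup u := by
  simp only [PySem.List.dedup_eq_ofList, ofList_eq_foldl]
  have h0 : List.foldl PySem.Set.add ([] : List Int) (v :: u)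
      = List.foldl PySem.Set.add (v :: []) u := by
    simp [PySem.Set.add]
  rw [h0, foldl_add_cons hv]

lemma foldl_add_replicate_mem {v : Int} {s : List Int} (hv : v ∈ s) (m : Nat) (u : List Int) :
    List.foldl PySem.Set.add s (List.replicate m v ++ u) = List.foldl PySem.Set.add s u := by
  induction m with
  | zero => simp
  | succ m ih =>
    rw [List.replicate_succ, List.cons_append, List.foldl_cons]
    have : PySem.Set.add s v = s := by simp [PySem.Set.add, hv]
    rw [this, ih]

lemma dedup_replicate_append {m : Nat} (hm : 1 ≤ m) (v : Int) (u : List Int) :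
    PySem.List.dedup (List.replicate m v ++ u) = PySem.List.dedup (v :: u) := by
  obtain ⟨m, rfl⟩ : ∃ m', m = m' + 1 := ⟨m - 1, by omega⟩
  simp only [PySem.List.dedup_eq_ofList, ofList_eq_foldl]
  rw [List.replicate_succ, List.cons_append, List.foldl_cons, List.foldl_cons]
  have h1 : PySem.Set.add ([] : List Int) v = [v] := by simp [PySem.Set.add]
  rw [h1, foldl_add_replicate_mem (List.mem_singleton.mpr rfl)]

lemma dedup_append_mem {l : List Int} {d : Int} (h : d ∈ l) :
    PySem.List.dedup (l ++ [d]) = PySem.List.dedup l := by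
  simp only [PySem.List.dedup_eq_ofList, ofList_append]
  have : d ∈ PySem.Set.ofList l := (PySem.Set.mem_ofList l d).mpr h
  simp [PySem.Set.add, this]

lemma dedup_append_not_mem {l : List Int} {d : Int} (h : d ∉ l) :
    PySem.List.dedup (l ++ [d]) = PySem.List.dedup l ++ [d] := by
  simp only [PySem.List.dedup_eq_ofList, ofList_append]
  have : d ∉ PySem.Set.ofList l := fun hc => h ((PySem.Set.mem_ofList l d).mp hc)
  simp [PySem.Set.add, this]

-- A's dedupe-by-index loop is map firstIdx of the ordered dedup
lemma foldA (xs : List Int) :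
    ∀ (p seen : List Int), (∀ a ∈ p, a ∈ xs) → (∀ a ∈ seen, a ∈ xs) →
    p.foldl (fun acc d => if firstIdx xs d ∈ acc then acc else acc ++ [firstIdx xs d])
        ((PySem.List.dedup seen).map (firstIdx xs))
      = (PySem.List.dedup (seen ++ p)).map (firstIdx xs) := by
  intro p
  induction p with
  | nil => intro seen _ _; simp
  | cons d p ih =>
    intro seen hp hseen
    have hd : d ∈ xs := hp d List.mem_cons_self
    have hp' : ∀ a ∈ p, a ∈ xs := fun a ha => hp a (List.mem_cons_of_mem _ ha)
    have hmem : (firstIdx xs d ∈ (PySem.List.dedup seen).map (firstIdx xs)) ↔ d ∈ seen := by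
      constructor
      · rintro hin
        obtain ⟨a, hamem, hfa⟩ := List.mem_map.mp hin
        have haseen : a ∈ seen := (PySem.List.mem_dedup seen a).mp hamem
        exact firstIdx_inj (hseen a haseen) hd hfa ▸ haseen
      · intro hds
        exact List.mem_map.mpr ⟨d, (PySem.List.mem_dedup seen d).mpr hds, rfl⟩
    rw [List.foldl_cons]
    have hshape : seen ++ d :: p = (seen ++ [d]) ++ p := by
      rw [List.append_assoc, List.singleton_append]
    by_cases hds : d ∈ seen
    · rw [if_pos (hmem.mpr hds), ih seen hp' hseen]
      have key : PySem.List.dedup (seen ++ d :: p) = PySem.List.dedup (seen ++ p) := by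
        rw [hshape]
        simp only [PySem.List.dedup_eq_ofList, ofList_append]
        have h2 := dedup_append_mem hds
        simp only [PySem.List.dedup_eq_ofList, ofList_append] at h2
        rw [h2]
      rw [key]
    · rw [if_neg (fun hc => hds (hmem.mp hc))]
      have hseen' : ∀ a ∈ seen ++ [d], a ∈ xs := by
        intro a ha
        rcases List.mem_append.mp ha with h1 | h1
        · exact hseen a h1
        · rw [List.mem_singleton.mp h1]; exact hd
      have hinit : List.map (firstIdx xs) (PySem.List.dedup (seen ++ [d]))
          = List.map (firstIdx xs) (PySem.List.dedup seen) ++ [firstIdx xs d] := by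
        rw [dedup_append_not_mem hds, List.map_append, List.map_cons, List.map_nil]
      have h3 := ih (seen ++ [d]) hp' hseen'
      rw [hinit] at h3
      rw [h3, hshape]

lemma count_flatMap_replicate (c : Int → Nat) (w : Int) :
    ∀ (vs : List Int), vs.Nodup →
    (vs.flatMap (fun v => List.replicate (c v) v)).count w = if w ∈ vs then c w else 0 := by
  intro vs
  induction vs with
  | nil => simp
  | cons v vs ih =>
    intro hnd
    rw [List.flatMap_cons, List.count_append, ih (List.nodup_cons.mp hnd).2]
    have hvnotin : v ∉ vs := (List.nodup_cons.mp hnd).1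
    by_cases hwv : w = v
    · subst hwv
      simp [hvnotin]
    · have h0 : (List.replicate (c v) v).count w = 0 := by
        simp [List.count_replicate]
        exact fun h => absurd h.symm hwv
      simp [h0, hwv, List.mem_cons]

lemma pairwise_le_flatMap_replicate (c : Int → Nat) :
    ∀ (vs : List Int), vs.Pairwise (· ≤ ·) →
    (vs.flatMap (fun v => List.replicate (c v) v)).Pairwise (· ≤ ·) := by
  intro vs
  induction vs with
  | nil => simp
  | cons v vs ih =>
    intro hpw
    obtain ⟨hall, htail⟩ := List.pairwise_cons.mp hpw
    rw [List.flatMap_cons]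
    rw [List.pairwise_append]
    refine ⟨List.pairwise_replicate_of_refl, ih htail, ?_⟩
    intro a ha b hb
    have hav : a = v := List.eq_of_mem_replicate ha
    obtain ⟨w, hwvs, hbw⟩ := List.mem_flatMap.mp hb
    have hbw' : b = w := List.eq_of_mem_replicate hbw
    rw [hav, hbw']
    exact hall w hwvs

lemma vsOf_nodup (xs : List Int) : (vsOf xs).Nodup := by
  have h := PySem.List.sorted_perm (PySem.List.dedup xs) (fun x => x) false
  have hnd : (PySem.List.dedup xs).Nodup := by
    rw [PySem.List.dedup_eq_ofList]; exact PySem.Set.nodup_ofList xs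
  exact h.symm.nodup hnd

lemma mem_vsOf (xs : List Int) (v : Int) : v ∈ vsOf xs ↔ v ∈ xs := by
  unfold vsOf
  rw [PySem.List.mem_sorted, PySem.List.mem_dedup]

lemma vsOf_pairwise_lt (xs : List Int) : (vsOf xs).Pairwise (· < ·) := by
  have h1 : (vsOf xs).Pairwise (· ≤ ·) :=
    PySem.List.sorted_pairwise (PySem.List.dedup xs) (fun x => x)
  have h2 : (vsOf xs).Pairwise (· ≠ ·) := vsOf_nodup xs
  exact (h1.and h2).imp (fun h => lt_of_le_of_ne h.1 h.2)

lemma sorted_eq_blocks (xs : List Int) :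
    PySem.List.sorted xs (fun x => x) false = blocksOf xs := by
  apply PySem.List.sorted_id_eq_of_perm_of_pairwise
  · apply List.perm_iff_count.mpr
    intro w
    unfold blocksOf
    rw [count_flatMap_replicate (fun v => xs.count v) w (vsOf xs) (vsOf_nodup xs)]
    by_cases hw : w ∈ xs
    · simp [(mem_vsOf xs w).mpr hw]
    · simp [List.count_eq_zero.mpr hw]
  · exact pairwise_le_flatMap_replicate _ (vsOf xs) ((vsOf_pairwise_lt xs).imp le_of_lt)

lemma blocksOf_length (xs : List Int) : (blocksOf xs).length = xs.length := by
  rw [← sorted_eq_blocks, PySem.List.length_sorted]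

-- the B loop, against the dedup of a take of the block list
lemma loop_eq (xs : List Int) (first cnt : PySem.Dict Int Int) (k : Int) :
    ∀ (vs : List Int), vs.Pairwise (· < ·) →
    (∀ v ∈ vs, first.getD v 0 = firstIdx xs v) →
    (∀ v ∈ vs, cnt.getD v 0 = (xs.count v : Int)) →
    (∀ v ∈ vs, 1 ≤ xs.count v) →
    ∀ (out : List Int) (seen : Int), 0 ≤ seen →
    bestLoop first cnt k vs out seen
      = out ++ (PySem.List.dedup
          ((vs.flatMap (fun v => List.replicate (xs.count v) v)).take ((k - seen).toNat))).map (firstIdx xs) := by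
  intro vs
  induction vs with
  | nil => intro _ _ _ _ out seen _; simp [bestLoop]
  | cons v vs ih =>
    intro hpw hfirst hcnt hpos out seen hseen
    obtain ⟨hvlt, htail⟩ := List.pairwise_cons.mp hpw
    have hfv := hfirst v List.mem_cons_self
    have hcv := hcnt v List.mem_cons_self
    have hposv := hpos v List.mem_cons_self
    rw [bestLoop]
    by_cases hks : seen ≥ k
    · rw [if_pos hks]
      have ht0 : (k - seen).toNat = 0 := by omega
      simp [ht0]
    · rw [if_neg hks]
      have hklt : seen < k := by omega
      set c : Nat := xs.count v with hc
      set u : List Int := vs.flatMap (fun w => List.replicate (xs.count w) w) with hu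
      have ht1 : 1 ≤ (k - seen).toNat := by omega
      have hmin : 1 ≤ min ((k - seen).toNat) c := by omega
      have htake : ((List.replicate c v ++ u).take ((k - seen).toNat))
          = List.replicate (min ((k - seen).toNat) c) v ++ u.take ((k - seen).toNat - c) := by
        rw [List.take_append, List.take_replicate, List.length_replicate]
      have hvnot : v ∉ u.take ((k - seen).toNat - c) := by
        intro hvm
        have hvu : v ∈ u := List.mem_of_mem_take hvm
        obtain ⟨w, hwvs, hvw⟩ := List.mem_flatMap.mp hvu
        have : v = w := List.eq_of_mem_replicate hvw
        exact absurd (this ▸ hvlt w hwvs) (lt_irrefl v)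
      have hstep := ih htail (fun w hw => hfirst w (List.mem_cons_of_mem _ hw))
        (fun w hw => hcnt w (List.mem_cons_of_mem _ hw))
        (fun w hw => hpos w (List.mem_cons_of_mem _ hw))
        (out ++ [first.getD v 0]) (seen + cnt.getD v 0) (by rw [hcv]; omega)
      rw [hstep, hcv, hfv]
      have harith : (k - (seen + (c : Int))).toNat = (k - seen).toNat - c := by omega
      rw [harith, List.flatMap_cons, ← hu, htake,
        dedup_replicate_append hmin, dedup_cons_not_mem hvnot]
      simp [List.append_assoc]

-- the first-occurrence dict built by the setdefault fold
lemma first_fold_getD (xs : List Int) :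
    ∀ (i : Int) (d : PySem.Dict Int Int) (v : Int),
    ((PySem.List.enumerate xs i).foldl (fun d p => d.setdefault p.2 p.1) d).getD v 0
      = if d.contains v then d.getD v 0
        else (match PySem.List.index? xs v with
              | some j => i + (j : Int)
              | none => d.getD v 0) := by
  induction xs with
  | nil =>
    intro i d v
    rw [PySem.List.enumerate_nil]
    simp only [List.foldl_nil]
    have hidx : PySem.List.index? ([] : List Int) v = none := rfl
    rw [hidx]
    split <;> rfl
  | cons x xs ih =>
    intro i d v
    rw [PySem.List.enumerate_cons, List.foldl_cons]
    rw [ih (i + 1) (d.setdefault x i) v]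
    by_cases hvx : v = x
    · subst hvx
      have hcont : (d.setdefault v i).contains v = true := by
        rw [PySem.Dict.contains_setdefault]; simp
      rw [if_pos hcont]
      have hgetd : (d.setdefault v i).getD v 0 = d.getD v i := PySem.Dict.getD_setdefault_self d v i 0
      have hidx : PySem.List.index? (v :: xs) v = some 0 :=
        PySem.List.index?_cons_self v xs
      rw [hgetd, hidx]
      by_cases hdc : d.contains v = true
      · rw [if_pos hdc]
        have hsome : (d.get? v).isSome = true := by
          rw [← PySem.Dict.contains_eq_isSome_get?]; exact hdc
        obtain ⟨w, hw⟩ := Option.isSome_iff_exists.mp hsome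
        rw [PySem.Dict.getD_eq_get?_getD, PySem.Dict.getD_eq_get?_getD, hw]
        rfl
      · rw [if_neg hdc]
        have hw : d.get? v = none := by
          cases hg : d.get? v with
          | none => rfl
          | some w => exact absurd (by rw [PySem.Dict.contains_eq_isSome_get?, hg]; rfl) hdc
        rw [PySem.Dict.getD_eq_get?_getD, hw]
        simp
    · have hcont : (d.setdefault x i).contains v = d.contains v := by
        rw [PySem.Dict.contains_setdefault]
        simp [hvx]
      have hgetd : (d.setdefault x i).getD v 0 = d.getD v 0 := by
        rw [PySem.Dict.getD_eq_get?_getD, PySem.Dict.getD_eq_get?_getD,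
          PySem.Dict.get?_setdefault_of_ne d i hvx]
      have hidx : PySem.List.index? (x :: xs) v
          = (PySem.List.index? xs v).map (· + 1) :=
        PySem.List.index?_cons_of_ne xs (fun h => hvx h.symm)
      rw [hcont, hgetd, hidx]
      by_cases hdc : d.contains v = true
      · rw [if_pos hdc, if_pos hdc]
      · rw [if_neg hdc, if_neg hdc]
        cases hj : PySem.List.index? xs v with
        | none => simp
        | some j =>
          simp only [Option.map_some]
          push_cast
          ring

lemma first_fold_contains (xs : List Int) :
    ∀ (i : Int) (d : PySem.Dict Int Int) (v : Int),
    ((PySem.List.enumerate xs i).foldl (fun d p => d.setdefault p.2 p.1) d).contains v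
      = (d.contains v || decide (v ∈ xs)) := by
  induction xs with
  | nil =>
    intro i d v
    rw [PySem.List.enumerate_nil]
    simp
  | cons x xs ih =>
    intro i d v
    rw [PySem.List.enumerate_cons, List.foldl_cons, ih (i + 1) (d.setdefault x i) v,
      PySem.Dict.contains_setdefault]
    by_cases hvx : v = x
    · subst hvx; simp
    · simp [hvx, List.mem_cons, beq_iff_eq, Bool.or_assoc]

lemma first_fold_nodup_keys (xs : List Int) :
    ∀ (i : Int) (d : PySem.Dict Int Int), d.keys.Nodup →
    ((PySem.List.enumerate xs i).foldl (fun d p => d.setdefault p.2 p.1) d).keys.Nodup := by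
  induction xs with
  | nil =>
    intro i d hd
    rw [PySem.List.enumerate_nil]
    exact hd
  | cons x xs ih =>
    intro i d hd
    rw [PySem.List.enumerate_cons, List.foldl_cons]
    apply ih (i + 1)
    rw [PySem.Dict.keys_setdefault]
    by_cases hdc : d.contains x = true
    · rw [if_pos hdc]; exact hd
    · rw [if_neg hdc]
      have hx : x ∉ d.keys := fun hm =>
        hdc ((PySem.Dict.contains_iff_mem_keys d x).mpr hm)
      simp only [List.nodup_append, List.nodup_singleton, true_and]
      refine ⟨hd, ?_⟩
      intro a ha b hb hab
      rw [List.mem_singleton.mp hb] at hab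
      exact hx (hab ▸ ha)

lemma cnt_fold_getD (xs : List Int) (v : Int) :
    ((PySem.List.enumerate xs 0).foldl
        (fun (d : PySem.Dict Int Int) (p : Int × Int) => d.insert p.2 (d.getD p.2 0 + 1))
        PySem.Dict.empty).getD v 0 = (xs.count v : Int) := by
  have h1 : (PySem.List.enumerate xs 0).foldl
        (fun (d : PySem.Dict Int Int) (p : Int × Int) => d.insert p.2 (d.getD p.2 0 + 1))
        PySem.Dict.empty
      = xs.foldl (fun (d : PySem.Dict Int Int) (x : Int) => d.insert x (d.getD x 0 + 1))
        PySem.Dict.empty := by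
    conv_rhs => rw [← PySem.List.map_snd_enumerate xs 0, List.foldl_map]
  rw [h1, PySem.Dict.getD_foldl_insert_add_one]
  show (0 : Int) + xs.count v = xs.count v
  omega

-- A = map firstIdx of the ordered dedup of the first clampIdx(len, n) sorted blocks
lemma A_shape (xs : List Int) (n : Int) :
    get_best_indices xs n
      = (PySem.List.dedup ((blocksOf xs).take (PySem.List.clampIdx xs.length n))).map (firstIdx xs) := by
  have hp : ∀ a ∈ PySem.List.slice (PySem.List.sorted xs (fun x => x) false) none (some n), a ∈ xs := by
    intro a ha
    exact (PySem.List.mem_sorted xs (fun x => x) false a).mp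
      (PySem.List.mem_of_mem_slice _ _ _ ha)
  have h0 := foldA xs
    (PySem.List.slice (PySem.List.sorted xs (fun x => x) false) none (some n)) [] hp
    (by intro a ha; cases ha)
  have hinit : (PySem.List.dedup ([] : List Int)).map (firstIdx xs) = [] := rfl
  rw [hinit, List.nil_append] at h0
  have hsl : PySem.List.slice (PySem.List.sorted xs (fun x => x) false) none (some n)
      = (blocksOf xs).take (PySem.List.clampIdx xs.length n) := by
    rw [sorted_eq_blocks]
    have hlen : (blocksOf xs).length = xs.length := blocksOf_length xs
    simp [PySem.List.slice, hlen]
  rw [← hsl]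
  exact h0

-- B = map firstIdx of the ordered dedup of the first n.toNat sorted blocks
lemma B_shape (xs : List Int) (n : Int) :
    get_best_indices_alt xs n
      = (PySem.List.dedup ((blocksOf xs).take n.toNat)).map (firstIdx xs) := by
  have hsplit := PySem.List.foldl_prod_mk
    (fun (d : PySem.Dict Int Int) (id : Int × Int) => d.setdefault id.2 id.1)
    (fun (d : PySem.Dict Int Int) (id : Int × Int) => d.insert id.2 (d.getD id.2 0 + 1))
    (PySem.List.enumerate xs 0) PySem.Dict.empty PySem.Dict.empty
  have hFnd : ((PySem.List.enumerate xs 0).foldl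
      (fun (d : PySem.Dict Int Int) (p : Int × Int) => d.setdefault p.2 p.1)
      PySem.Dict.empty).keys.Nodup :=
    first_fold_nodup_keys xs 0 PySem.Dict.empty List.nodup_nil
  have hkeys : PySem.List.sorted ((PySem.List.enumerate xs 0).foldl
      (fun (d : PySem.Dict Int Int) (p : Int × Int) => d.setdefault p.2 p.1)
      PySem.Dict.empty).keys (fun x => x) false = vsOf xs := by
    apply PySem.List.sorted_id_eq_of_perm_of_pairwise
    · apply (List.perm_ext_iff_of_nodup (vsOf_nodup xs) hFnd).mpr
      intro a
      rw [mem_vsOf, ← PySem.Dict.contains_iff_mem_keys, first_fold_contains xs 0]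
      simp [PySem.Dict.empty, PySem.Dict.contains]
    · exact PySem.List.sorted_pairwise (PySem.List.dedup xs) (fun x => x)
  have hfirst : ∀ v ∈ vsOf xs,
      ((PySem.List.enumerate xs 0).foldl
        (fun (d : PySem.Dict Int Int) (p : Int × Int) => d.setdefault p.2 p.1)
        PySem.Dict.empty).getD v 0 = firstIdx xs v := by
    intro v hv
    have hvxs : v ∈ xs := (mem_vsOf xs v).mp hv
    obtain ⟨j, hj⟩ := Option.isSome_iff_exists.mp ((PySem.List.index?_isSome_iff xs v).mpr hvxs)
    rw [first_fold_getD xs 0 PySem.Dict.empty v]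
    have hce : (PySem.Dict.empty : PySem.Dict Int Int).contains v = false := rfl
    rw [if_neg (by rw [hce]; exact Bool.false_ne_true), hj]
    unfold firstIdx
    rw [hj]
    simp
  have hcnt : ∀ v ∈ vsOf xs,
      ((PySem.List.enumerate xs 0).foldl
        (fun (d : PySem.Dict Int Int) (p : Int × Int) => d.insert p.2 (d.getD p.2 0 + 1))
        PySem.Dict.empty).getD v 0 = (xs.count v : Int) := fun v _ => cnt_fold_getD xs v
  have hpos : ∀ v ∈ vsOf xs, 1 ≤ xs.count v := fun v hv =>
    List.count_pos_iff.mpr ((mem_vsOf xs v).mp hv)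
  have hloop := loop_eq xs _ _ n (vsOf xs) (vsOf_pairwise_lt xs) hfirst hcnt hpos [] 0 le_rfl
  rw [sub_zero, List.nil_append] at hloop
  unfold get_best_indices_alt
  simp only [hsplit, hkeys]
  exact hloop

-- ===== VERDICT (by name: the statement is the Claim_ definition above) =====
theorem get_best_indices_spec : Claim_unchanged_get_best_indices := by
  intro xs n _
  unfold Spec_get_best_indices
  intro hnd
  rw [A_shape, B_shape]
  have hnd' : ¬ (n < 0 ∧ 1 ≤ (xs.length : Int) + n) := fun h => hnd h
  have hc : (blocksOf xs).take (PySem.List.clampIdx xs.length n) = (blocksOf xs).take n.toNat := by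
    have hlen : (blocksOf xs).length = xs.length := blocksOf_length xs
    apply List.take_eq_take_iff.mpr
    have hci : PySem.List.clampIdx xs.length n = min n.toNat xs.length := by
      simp only [PySem.List.clampIdx]
      split_ifs <;> omega
    rw [hci, hlen]
    omega
  rw [hc]

theorem get_best_indices_changed : Claim_changed_get_best_indices := by
  unfold Claim_changed_get_best_indices
  refine ⟨by decide, by unfold D_get_best_indices pvDiffWitness_get_best_indices; decide, by decide, by decide, by decide⟩

theorem get_best_indices_tight : Claim_exact_get_best_indices := by
  intro xs n _ hd
  obtain ⟨hneg, hlen⟩ := hd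
  rw [A_shape, B_shape]
  have hA : ((blocksOf xs).take (PySem.List.clampIdx xs.length n)) ≠ [] := by
    have hlenb : (blocksOf xs).length = xs.length := blocksOf_length xs
    have hci : PySem.List.clampIdx xs.length n ≠ 0 := by
      simp only [PySem.List.clampIdx]
      split_ifs <;> omega
    have hnb : blocksOf xs ≠ [] := by
      intro h
      rw [h] at hlenb
      simp at hlenb
      omega
    simp [List.take_eq_nil_iff, hci, hnb]
  have hB : (blocksOf xs).take n.toNat = [] := by
    have : n.toNat = 0 := by omega
    simp [this]
  rw [hB]
  intro hcontr
  obtain ⟨a, t, hat⟩ := List.exists_cons_of_ne_nil hA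
  have hmem : a ∈ PySem.List.dedup ((blocksOf xs).take (PySem.List.clampIdx xs.length n)) := by
    rw [hat]
    exact (PySem.List.mem_dedup _ a).mpr List.mem_cons_self
  have hmapnil : (PySem.List.dedup ((blocksOf xs).take (PySem.List.clampIdx xs.length n))).map (firstIdx xs) = [] := by
    simpa using hcontr
  exact List.ne_nil_of_mem hmem (List.map_eq_nil_iff.mp hmapnil)
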